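-- pv_equiv track=rewrite | github.com/acreally/leetcode | src/task_scheduler/solution.py | find_max_frequency
-- ===== SOURCE A (Python) =====
-- from typing import List
--
-- def find_max_frequency(tasks: List[str]) -> (int, int):
--     max_freq = 0
--     num_max_freq = 0
--     counts = {}
--     for task in tasks:
--         count = counts.get(task, 0) + 1
--         counts[task] = count
--         if count > max_freq:
--             max_freq = count
--             num_max_freq = 1
--         elif count == max_freq:
--             num_max_freq += 1
--     return max_freq, num_max_freq
-- ===== SOURCE B (Python) =====
-- from typing import List
--
-- def find_max_frequency(tasks: List[str]) -> (int, int):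
--     counts = {}
--     for t in tasks:
--         counts[t] = counts.get(t, 0) + 1
--     vals = list(counts.values())
--     if not vals:
--         return 0, 0
--     m = max(vals)
--     return m, vals.count(m)
-- ===== Notes on version B (the rewrite author's own statement) =====
-- stated objective: simpler
-- what changed: A tracks a running maximum and its multiplicity with branch logic inside the counting loop; B first builds the full frequency table, then computes max(values) and counts how many values reach it in separate passes.
import Mathlib
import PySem

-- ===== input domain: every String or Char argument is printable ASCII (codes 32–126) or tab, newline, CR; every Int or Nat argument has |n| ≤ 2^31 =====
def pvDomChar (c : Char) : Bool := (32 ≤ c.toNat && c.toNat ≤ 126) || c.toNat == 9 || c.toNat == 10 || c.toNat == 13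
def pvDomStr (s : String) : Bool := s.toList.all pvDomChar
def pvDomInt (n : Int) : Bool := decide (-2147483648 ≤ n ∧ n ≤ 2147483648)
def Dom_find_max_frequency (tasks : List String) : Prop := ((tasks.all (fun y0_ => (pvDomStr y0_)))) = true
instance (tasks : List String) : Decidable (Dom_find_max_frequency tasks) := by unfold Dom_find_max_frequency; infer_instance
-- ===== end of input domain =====

-- B replaces A's in-loop running maximum/multiplicity bookkeeping by separate passes:
-- build the frequency table, then take max(values) and count the values reaching it.

-- ===== PORT A =====
def find_max_frequency (tasks : List String) : Int × Int :=
  let r := tasks.foldl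
    (fun (st : Int × Int × PySem.Dict String Int) task =>
      let mf := st.1
      let nf := st.2.1
      let counts := st.2.2
      let count := counts.getD task 0 + 1
      let counts' := counts.insert task count
      if count > mf then (count, 1, counts')
      else if count == mf then (mf, nf + 1, counts')
      else (mf, nf, counts'))
    (0, 0, PySem.Dict.empty)
  (r.1, r.2.1)

-- ===== PORT B =====
def find_max_frequency_alt (tasks : List String) : Int × Int :=
  let counts := tasks.foldl (fun d t => d.insert t (d.getD t 0 + 1)) PySem.Dict.empty
  let vals := counts.values
  match PySem.List.max? vals id with
  | none => (0, 0)
  | some m => (m, (vals.count m : Int))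

-- ===== PRECONDITION & SPEC =====
def Spec_find_max_frequency (tasks : List String) (out : Int × Int) : Prop := out = find_max_frequency_alt tasks
instance (tasks : List String) (out : Int × Int) : Decidable (Spec_find_max_frequency tasks out) := by unfold Spec_find_max_frequency; infer_instance

-- ===== CLAIM (what is proved, stated in full; the proofs are below) =====
def Claim_equal_find_max_frequency : Prop := ∀ (tasks : List String), Dom_find_max_frequency tasks → Spec_find_max_frequency tasks (find_max_frequency tasks)

-- ===== LEMMAS AND PROOFS =====

-- the distinct tasks of l, in first-occurrence order
def pvKeys (l : List String) : List String := PySem.Set.ofList l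
-- the frequency-table values of l
def pvVals (l : List String) : List Int := (pvKeys l).map (fun k => (l.count k : Int))
-- the maximum frequency (0 for the empty list)
def pvM (l : List String) : Int := (PySem.List.max? (pvVals l) id).getD 0
-- how many values reach it
def pvN (l : List String) : Int := ((pvVals l).count (pvM l) : Int)


lemma foldl_preserves_isSome (f : Option Int → Int → Option Int)
    (hf : ∀ m x, (f (some m) x).isSome) :
    ∀ (xs : List Int) (a : Int), (List.foldl f (some a) xs).isSome := by
  intro xs
  induction xs with
  | nil => intro a; rfl
  | cons y ys ih =>
      intro a
      simp only [List.foldl]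
      obtain ⟨b, hb⟩ := Option.isSome_iff_exists.mp (hf a y)
      rw [hb]; exact ih b

lemma max?_id_isSome (xs : List Int) (h : xs ≠ []) : (PySem.List.max? xs id).isSome := by
  cases xs with
  | nil => simp at h
  | cons x xs =>
      unfold PySem.List.max?
      simp only [List.foldl]
      apply foldl_preserves_isSome
      intro m x'
      dsimp only
      split <;> rfl

lemma max?_id_eq_some_iff (xs : List Int) (m : Int) :
    PySem.List.max? xs id = some m ↔ m ∈ xs ∧ ∀ x ∈ xs, x ≤ m := by
  constructor
  · intro h
    exact ⟨PySem.List.max?_mem h, fun x hx => PySem.List.max?_isMax h x hx⟩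
  · rintro ⟨hm, hle⟩
    cases h : PySem.List.max? xs id with
    | none =>
        have := max?_id_isSome xs (by rintro rfl; simp at hm)
        rw [h] at this; simp at this
    | some m' =>
        have h1 : m' ≤ m := hle m' (PySem.List.max?_mem h)
        have h2 : m ≤ m' := PySem.List.max?_isMax h m hm
        rw [le_antisymm h1 h2]

lemma vals_eq (l : List String) :
    (l.foldl (fun d t => d.insert t (d.getD t 0 + 1)) PySem.Dict.empty).values = pvVals l := by
  rw [PySem.Dict.foldl_insert_getD_add_one_eq_counter]
  simp [PySem.Dict.values, PySem.Dict.items_counter, pvVals, pvKeys, List.map_map]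

lemma vals_pos (l : List String) : ∀ v ∈ pvVals l, 1 ≤ v := by
  intro v hv
  simp only [pvVals, pvKeys, List.mem_map] at hv
  obtain ⟨k, hk, rfl⟩ := hv
  have : k ∈ l := (PySem.Set.mem_ofList l k).mp hk
  exact_mod_cast List.count_pos_iff.mpr this

lemma M_spec (l : List String) (h : l ≠ []) :
    pvM l ∈ pvVals l ∧ ∀ x ∈ pvVals l, x ≤ pvM l := by
  have hne : pvVals l ≠ [] := by
    simp only [pvVals, pvKeys]
    cases l with
    | nil => simp at h
    | cons a l =>
        have : a ∈ PySem.Set.ofList (a :: l) := (PySem.Set.mem_ofList _ a).mpr (by simp)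
        intro hcon
        rw [List.map_eq_nil_iff] at hcon
        simp [hcon] at this
  obtain ⟨m, hm⟩ := Option.isSome_iff_exists.mp (max?_id_isSome _ hne)
  have hM : pvM l = m := by rw [pvM, hm]; rfl
  rw [hM]
  exact (max?_id_eq_some_iff _ m).mp hm

lemma keys_append_mem (l : List String) (t : String) (ht : t ∈ l) :
    pvKeys (l ++ [t]) = pvKeys l := by
  simp only [pvKeys, PySem.Set.ofList, List.foldl_append, List.foldl]
  show PySem.Set.add _ t = _
  rw [PySem.Set.add]
  simp only [PySem.Set.contains_iff]
  split_ifs with hc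
  · rfl
  · exact absurd ((PySem.Set.mem_ofList l t).mpr ht) hc

lemma keys_append_not_mem (l : List String) (t : String) (ht : t ∉ l) :
    pvKeys (l ++ [t]) = pvKeys l ++ [t] := by
  simp only [pvKeys, PySem.Set.ofList, List.foldl_append, List.foldl]
  show PySem.Set.add _ t = _
  rw [PySem.Set.add]
  simp only [PySem.Set.contains_iff]
  split_ifs with hc
  · exact absurd ((PySem.Set.mem_ofList l t).mp hc) ht
  · rfl

lemma mem_keys_iff (l : List String) (k : String) : k ∈ pvKeys l ↔ k ∈ l :=
  PySem.Set.mem_ofList l k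

lemma vals_append_not_mem (l : List String) (t : String) (ht : t ∉ l) :
    pvVals (l ++ [t]) = pvVals l ++ [1] := by
  simp only [pvVals, keys_append_not_mem l t ht, List.map_append, List.map_cons, List.map_nil]
  congr 1
  · apply List.map_congr_left
    intro k hk
    have hkl : k ∈ l := (mem_keys_iff l k).mp hk
    have hkt : k ≠ t := fun h => ht (h ▸ hkl)
    have h0 : ([t] : List String).count k = 0 := List.count_eq_zero.mpr (by simp [hkt])
    rw [List.count_append, h0]
    simp
  · have h0 : l.count t = 0 := List.count_eq_zero.mpr ht
    have h1 : ([t] : List String).count t = 1 := by simp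
    rw [List.count_append, h0, h1]
    simp

lemma vals_append_mem (l : List String) (t : String) (ht : t ∈ l) :
    pvVals (l ++ [t]) =
      (pvKeys l).map (fun k => if k = t then (l.count t : Int) + 1 else (l.count k : Int)) := by
  simp only [pvVals, keys_append_mem l t ht]
  apply List.map_congr_left
  intro k _
  by_cases hkt : k = t
  · subst hkt
    have h1 : ([k] : List String).count k = 1 := by simp
    rw [List.count_append, h1, if_pos rfl]
    push_cast; ring
  · have h0 : ([t] : List String).count k = 0 := List.count_eq_zero.mpr (by simp [hkt])
    rw [List.count_append, h0, if_neg hkt]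
    simp

lemma count_map_eq_countP (g : String → Int) (K : List String) (c : Int) :
    (K.map g).count c = K.countP (fun k => g k == c) := by
  simp [List.count, List.countP_map]
  rfl

lemma countP_single_true (K : List String) (t : String) (hK : K.Nodup) (ht : t ∈ K)
    (p q : String → Bool) (hpq : ∀ k ∈ K, k ≠ t → p k = q k)
    (hpt : p t = true) (hqt : q t = false) :
    K.countP p = K.countP q + 1 := by
  obtain ⟨K1, K2, rfl⟩ := List.append_of_mem ht
  have hnd := hK
  rw [List.nodup_append] at hnd
  have ht1 : t ∉ K1 := fun h => hnd.2.2 t h t (by simp) rfl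
  have ht2 : t ∉ K2 := by
    have := hnd.2.1
    simp [List.nodup_cons] at this
    exact this.1
  have e1 : K1.countP p = K1.countP q :=
    List.countP_congr (fun k hk => by rw [hpq k (by simp [hk]) (fun h => ht1 (h ▸ hk))])
  have e2 : K2.countP p = K2.countP q :=
    List.countP_congr (fun k hk => by rw [hpq k (by simp [hk]) (fun h => ht2 (h ▸ hk))])
  simp [List.countP_append, e1, e2, hpt, hqt]
  omega

lemma ft_le_M (l : List String) (t : String) (ht : t ∈ l) : (l.count t : Int) ≤ pvM l := by
  have hl : l ≠ [] := by rintro rfl; simp at ht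
  refine (M_spec l hl).2 _ ?_
  simp only [pvVals, List.mem_map]
  exact ⟨t, (mem_keys_iff l t).mpr ht, rfl⟩

lemma step_gt (l : List String) (t : String) (h : (l.count t : Int) + 1 > pvM l) :
    pvM (l ++ [t]) = (l.count t : Int) + 1 ∧ pvN (l ++ [t]) = 1 := by
  by_cases ht : t ∈ l
  · have hl : l ≠ [] := by rintro rfl; simp at ht
    obtain ⟨_, hmax⟩ := M_spec l hl
    have hvals := vals_append_mem l t ht
    have hmaxsome : PySem.List.max? (pvVals (l ++ [t])) id = some ((l.count t : Int) + 1) := by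
      rw [max?_id_eq_some_iff, hvals]
      constructor
      · exact List.mem_map.mpr ⟨t, (mem_keys_iff l t).mpr ht, by simp⟩
      · intro x hx
        obtain ⟨k, hk, rfl⟩ := List.mem_map.mp hx
        by_cases hkt : k = t
        · simp [hkt]
        · have : (l.count k : Int) ≤ pvM l := hmax _ (List.mem_map.mpr ⟨k, hk, rfl⟩)
          simp only [if_neg hkt]
          omega
    have hM' : pvM (l ++ [t]) = (l.count t : Int) + 1 := by rw [pvM, hmaxsome]; rfl
    refine ⟨hM', ?_⟩
    rw [pvN, hM', hvals, count_map_eq_countP]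
    have : (pvKeys l).countP
          (fun k => (if k = t then (l.count t : Int) + 1 else (l.count k : Int)) == (l.count t : Int) + 1)
        = (pvKeys l).countP (fun _ => false) + 1 := by
      apply countP_single_true _ t (PySem.Set.nodup_ofList l) ((mem_keys_iff l t).mpr ht)
      · intro k hk hkt
        have hle : (l.count k : Int) ≤ pvM l := hmax _ (List.mem_map.mpr ⟨k, hk, rfl⟩)
        simp only [if_neg hkt, beq_eq_false_iff_ne, ne_eq]
        omega
      · simp
      · rfl
    rw [this]
    simp
  · have hc0 : l.count t = 0 := List.count_eq_zero.mpr ht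
    have hl : l = [] := by
      by_contra hl
      have h1 : pvM l ∈ pvVals l := (M_spec l hl).1
      have := vals_pos l _ h1
      rw [hc0] at h
      omega
    subst hl
    rw [hc0]
    have hv : pvVals ([] ++ [t]) = [1] := by simpa using vals_append_not_mem [] t ht
    have hM' : pvM ([] ++ [t]) = (0 : Int) + 1 := by rw [pvM, hv]; rfl
    refine ⟨by exact_mod_cast hM', ?_⟩
    rw [pvN, hv, hM']
    rfl

lemma step_eq (l : List String) (t : String) (h : (l.count t : Int) + 1 = pvM l) :
    pvM (l ++ [t]) = pvM l ∧ pvN (l ++ [t]) = pvN l + 1 := by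
  have hl : l ≠ [] := by
    rintro rfl
    simp [pvM, pvVals, pvKeys, PySem.List.max?] at h
  obtain ⟨hmem, hmax⟩ := M_spec l hl
  by_cases ht : t ∈ l
  · have hvals := vals_append_mem l t ht
    have hmaxsome : PySem.List.max? (pvVals (l ++ [t])) id = some (pvM l) := by
      rw [max?_id_eq_some_iff, hvals]
      constructor
      · obtain ⟨k0, hk0, hfk0⟩ := List.mem_map.mp hmem
        have hk0t : k0 ≠ t := by
          intro hkt; subst hkt; omega
        exact List.mem_map.mpr ⟨k0, hk0, by simp [if_neg hk0t, hfk0]⟩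
      · intro x hx
        obtain ⟨k, hk, rfl⟩ := List.mem_map.mp hx
        by_cases hkt : k = t
        · simp only [if_pos hkt]; omega
        · simp only [if_neg hkt]
          exact hmax _ (List.mem_map.mpr ⟨k, hk, rfl⟩)
    have hM' : pvM (l ++ [t]) = pvM l := by rw [pvM, hmaxsome]; rfl
    refine ⟨hM', ?_⟩
    rw [pvN, hM', hvals, count_map_eq_countP, pvN, pvVals, count_map_eq_countP]
    have : (pvKeys l).countP
          (fun k => (if k = t then (l.count t : Int) + 1 else (l.count k : Int)) == pvM l)
        = (pvKeys l).countP (fun k => (l.count k : Int) == pvM l) + 1 := by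
      apply countP_single_true _ t (PySem.Set.nodup_ofList l) ((mem_keys_iff l t).mpr ht)
      · intro k hk hkt
        simp [if_neg hkt]
      · simp only [beq_iff_eq]
        exact h
      · simp only [beq_eq_false_iff_ne, ne_eq]
        omega
    rw [this]
    push_cast
    ring
  · have hc0 : l.count t = 0 := List.count_eq_zero.mpr ht
    have hvals := vals_append_not_mem l t ht
    have h1 : pvM l = 1 := by rw [← h, hc0]; simp
    have hmaxsome : PySem.List.max? (pvVals (l ++ [t])) id = some (pvM l) := by
      rw [max?_id_eq_some_iff, hvals]
      constructor
      · simp [h1]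
      · intro x hx
        rcases List.mem_append.mp hx with hx | hx
        · exact hmax _ hx
        · simp at hx; omega
    have hM' : pvM (l ++ [t]) = pvM l := by rw [pvM, hmaxsome]; rfl
    refine ⟨hM', ?_⟩
    rw [pvN, hM', hvals, List.count_append, pvN]
    simp [h1]

lemma step_lt (l : List String) (t : String) (h : (l.count t : Int) + 1 < pvM l) :
    pvM (l ++ [t]) = pvM l ∧ pvN (l ++ [t]) = pvN l := by
  have hl : l ≠ [] := by
    rintro rfl
    simp [pvM, pvVals, pvKeys, PySem.List.max?] at h
  obtain ⟨hmem, hmax⟩ := M_spec l hl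
  by_cases ht : t ∈ l
  · have hvals := vals_append_mem l t ht
    have hft : (l.count t : Int) ≤ pvM l := ft_le_M l t ht
    have hmaxsome : PySem.List.max? (pvVals (l ++ [t])) id = some (pvM l) := by
      rw [max?_id_eq_some_iff, hvals]
      constructor
      · obtain ⟨k0, hk0, hfk0⟩ := List.mem_map.mp hmem
        have hk0t : k0 ≠ t := by
          intro hkt; subst hkt; omega
        exact List.mem_map.mpr ⟨k0, hk0, by simp [if_neg hk0t, hfk0]⟩
      · intro x hx
        obtain ⟨k, hk, rfl⟩ := List.mem_map.mp hx
        by_cases hkt : k = t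
        · simp only [if_pos hkt]; omega
        · simp only [if_neg hkt]
          exact hmax _ (List.mem_map.mpr ⟨k, hk, rfl⟩)
    have hM' : pvM (l ++ [t]) = pvM l := by rw [pvM, hmaxsome]; rfl
    refine ⟨hM', ?_⟩
    rw [pvN, hM', hvals, count_map_eq_countP, pvN, pvVals, count_map_eq_countP]
    congr 1
    apply List.countP_congr
    intro k hk
    by_cases hkt : k = t
    · subst hkt
      simp only [beq_iff_eq]
      constructor <;> intro <;> omega
    · simp [if_neg hkt]
  · have hc0 : l.count t = 0 := List.count_eq_zero.mpr ht
    have hvals := vals_append_not_mem l t ht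
    have h1 : (1 : Int) < pvM l := by rw [hc0] at h; simpa using h
    have hmaxsome : PySem.List.max? (pvVals (l ++ [t])) id = some (pvM l) := by
      rw [max?_id_eq_some_iff, hvals]
      constructor
      · exact List.mem_append.mpr (Or.inl hmem)
      · intro x hx
        rcases List.mem_append.mp hx with hx | hx
        · exact hmax _ hx
        · simp at hx; omega
    have hM' : pvM (l ++ [t]) = pvM l := by rw [pvM, hmaxsome]; rfl
    refine ⟨hM', ?_⟩
    rw [pvN, hM', hvals, List.count_append, pvN]
    have h0 : ([1] : List Int).count (pvM l) = 0 := by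
      rw [List.count_eq_zero]
      simp
      omega
    rw [h0]
    simp

lemma foldA (l : List String) :
    l.foldl
      (fun (st : Int × Int × PySem.Dict String Int) task =>
        let mf := st.1
        let nf := st.2.1
        let counts := st.2.2
        let count := counts.getD task 0 + 1
        let counts' := counts.insert task count
        if count > mf then (count, 1, counts')
        else if count == mf then (mf, nf + 1, counts')
        else (mf, nf, counts'))
      (0, 0, PySem.Dict.empty)
    = (pvM l, pvN l, l.foldl (fun d t => d.insert t (d.getD t 0 + 1)) PySem.Dict.empty) := by
  induction l using List.reverseRecOn with
  | nil => rfl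
  | append_singleton l t ih =>
      rw [List.foldl_append, ih]
      have hcount : (List.foldl (fun d t => d.insert t (d.getD t 0 + 1)) PySem.Dict.empty l).getD t 0
          = (l.count t : Int) := by
        rw [PySem.Dict.getD_foldl_insert_add_one]
        simp
      rw [List.foldl_append]
      simp only [List.foldl]
      rw [hcount]
      split_ifs with h1 h2
      · obtain ⟨hM, hN⟩ := step_gt l t h1
        rw [hM, hN]
      · obtain ⟨hM, hN⟩ := step_eq l t (by exact_mod_cast beq_iff_eq.mp h2)
        rw [hM, hN]
      · have hne : (l.count t : Int) + 1 ≠ pvM l := by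
          intro hc
          exact absurd (beq_iff_eq.mpr hc) (by simpa using h2)
        obtain ⟨hM, hN⟩ := step_lt l t (by omega)
        rw [hM, hN]

lemma alt_eq (l : List String) : find_max_frequency_alt l = (pvM l, pvN l) := by
  unfold find_max_frequency_alt
  dsimp only
  rw [vals_eq]
  cases h : PySem.List.max? (pvVals l) id with
  | none =>
      have hnil : pvVals l = [] := by
        by_contra hne
        have := max?_id_isSome _ hne
        rw [h] at this
        simp at this
      simp [pvM, pvN, hnil]
      rfl
  | some m =>
      have hM : pvM l = m := by rw [pvM, h]; rfl
      simp [pvN, hM]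

-- ===== VERDICT (by name: the statement is the Claim_ definition above) =====
theorem find_max_frequency_spec : Claim_equal_find_max_frequency := by
  intro tasks _
  show _ = _
  rw [find_max_frequency, foldA, alt_eq]
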